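-- pv_equiv track=rewrite | github.com/gouravshaw2014/Automaton-Tools | CCA/cca__1.py | convert
-- ===== SOURCE A (Python) =====
-- from collections import defaultdict
--
-- def convert(T):
--     '''
--     Convert to CCA_T format for optimaized selction of next states
--         {('q0', 'a'): ((('=', 0), '+1', {'q1', 'q0'}), (('=', 1), '0', {'q1'})),
--         ('q0', 'b'): ((('>=', 0), '0', {'q0'}), (('>=', 0), '0', {'q1'})),
--         ('q1', 'a'): ((('>=', 0), '0', {'q1'}),),
--         ('q1', 'b'): ((('>=', 0), '0', {'q1'}),)}
--
--     '''
--     # CCA_T = {}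
--     # for q, a, cond, inst, next_states in T:
--     #     key = (q, a)
--     #     val = (cond, inst, tuple(sorted(next_states)))  # convert set to sorted tuple
--     #     if key not in CCA_T:
--     #         CCA_T[key] = set()
--     #     CCA_T[key].add(val)
--     # return CCA_T
--     temp = defaultdict(set)
--
--     # Merge transitions with same (state, symbol, condition, instruction)
--     for state, symbol, condition, instruction, next_states in T:
--         key = (state, symbol, condition, instruction)
--         temp[key].update(next_states)
--
--     # Convert to final CCA_T format
--     grouped = defaultdict(list)
--     for (state, symbol, condition, instruction), next_states in temp.items():
--         grouped[(state, symbol)].append((condition, instruction, next_states))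
--
--     # Convert lists to tuples for consistency
--     for key in grouped:
--         grouped[key] = tuple(grouped[key])
--
--     return dict(grouped)
-- ===== SOURCE B (Python) =====
-- def convert(T):
--     # Dict-free nested-scan regrouping: list the distinct (state,symbol) keys in
--     # first-appearance order, then for each key scan its group, list its distinct
--     # (condition,instruction) pairs, and union the next-state sets by a filtered scan.
--     keys = []
--     for t in T:
--         k = (t[0], t[1])
--         if k not in keys:
--             keys.append(k)
--     out = {}
--     for k in keys:
--         group = [t for t in T if (t[0], t[1]) == k]
--         pairs = []
--         for t in group:
--             ci = (t[2], t[3])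
--             if ci not in pairs:
--                 pairs.append(ci)
--         entries = []
--         for cond, inst in pairs:
--             merged = set()
--             for t in group:
--                 if (t[2], t[3]) == (cond, inst):
--                     merged.update(t[4])
--             entries.append((cond, inst, merged))
--         out[k] = tuple(entries)
--     return out
-- ===== Notes on version B (the rewrite author's own statement) =====
-- stated objective: alternative
-- what changed: Replaces A's two hash-dict grouping passes (defaultdict merge by 4-tuple key, then regroup by (state,symbol)) with a dict-free brute-force scheme: dedup the (state,symbol) keys in first-appearance order, then for each key re-scan the list, dedup its (condition,instruction) pairs, and union next-state sets by filtered scans.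
import Mathlib
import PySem

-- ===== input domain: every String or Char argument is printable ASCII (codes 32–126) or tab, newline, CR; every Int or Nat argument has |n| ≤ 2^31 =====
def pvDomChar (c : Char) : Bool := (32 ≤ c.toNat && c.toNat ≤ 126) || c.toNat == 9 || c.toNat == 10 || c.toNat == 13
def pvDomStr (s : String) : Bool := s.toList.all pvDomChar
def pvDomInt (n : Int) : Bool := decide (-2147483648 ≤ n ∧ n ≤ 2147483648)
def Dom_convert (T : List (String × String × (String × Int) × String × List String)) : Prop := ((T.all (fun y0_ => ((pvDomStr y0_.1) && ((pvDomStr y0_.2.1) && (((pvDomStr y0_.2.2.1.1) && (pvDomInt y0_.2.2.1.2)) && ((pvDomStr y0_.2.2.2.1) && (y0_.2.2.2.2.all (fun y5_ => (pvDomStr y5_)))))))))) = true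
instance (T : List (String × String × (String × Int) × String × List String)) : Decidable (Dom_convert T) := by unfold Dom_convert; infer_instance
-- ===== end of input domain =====

-- B replaces A's two hash-dict grouping passes with a dict-free nested-scan regrouping
-- (dedup keys in first-appearance order, then filtered scans per key); alternative decomposition, not faster.


-- ===== PORT A =====
-- temp = defaultdict(set) merged by the 4-tuple key; grouped = defaultdict(list) regrouped by (state, symbol).
def convert (T : List (String × String × (String × Int) × String × List String)) : List (String × String × List ((String × Int) × String × List String)) :=
  let temp : PySem.Dict (String × String × (String × Int) × String) (PySem.Set String) :=
    T.foldl (fun d t =>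
      d.modify (t.1, t.2.1, t.2.2.1, t.2.2.2.1) PySem.Set.empty
        (fun s => PySem.Set.update s t.2.2.2.2)) PySem.Dict.empty
  let grouped : PySem.Dict (String × String) (List ((String × Int) × String × List String)) :=
    temp.items.foldl (fun g p =>
      g.modify (p.1.1, p.1.2.1) [] (fun l => l ++ [(p.1.2.2.1, p.1.2.2.2, p.2)])) PySem.Dict.empty
  grouped.items.map (fun p => (p.1.1, p.1.2, p.2))

-- ===== PORT B =====
-- dict-free: keys = first-appearance dedup of (state,symbol) ('if k not in keys: append' = Set.ofList);
-- per key, group = filtered scan of T; pairs = dedup of (cond,inst) in the group; per pair, a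
-- filtered scan of the group folding set.update over the matching next-state lists.
def convert_alt (T : List (String × String × (String × Int) × String × List String)) : List (String × String × List ((String × Int) × String × List String)) :=
  let keys : PySem.Set (String × String) := PySem.Set.ofList (T.map (fun t => (t.1, t.2.1)))
  keys.map (fun k =>
    let group := T.filter (fun t => (t.1, t.2.1) == k)
    let pairs : PySem.Set ((String × Int) × String) :=
      PySem.Set.ofList (group.map (fun t => (t.2.2.1, t.2.2.2.1)))
    (k.1, k.2, pairs.map (fun ci =>
      (ci.1, ci.2,
        (group.filter (fun t => (t.2.2.1, t.2.2.2.1) == ci)).foldl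
          (fun s t => PySem.Set.update s t.2.2.2.2) PySem.Set.empty))))

-- ===== PRECONDITION & SPEC =====
def Spec_convert (T : List (String × String × (String × Int) × String × List String)) (out : List (String × String × List ((String × Int) × String × List String))) : Prop := out = convert_alt T
instance (T : List (String × String × (String × Int) × String × List String)) (out : List (String × String × List ((String × Int) × String × List String))) : Decidable (Spec_convert T out) := by
  unfold Spec_convert
  letI : DecidableEq ((String × Int) × String × List String) := inferInstance
  letI : DecidableEq (String × String × List ((String × Int) × String × List String)) := inferInstance
  infer_instance

-- ===== CLAIM (what is proved, stated in full; the proofs are below) =====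
def Claim_equal_convert : Prop := ∀ (T : List (String × String × (String × Int) × String × List String)), Dom_convert T → Spec_convert T (convert T)

-- ===== LEMMAS AND PROOFS =====

-- set(xs) commutes with filtering (first-occurrence order is preserved by a pointwise filter).
theorem pvOfList_filter {α : Type} [BEq α] [LawfulBEq α] (p : α → Bool) (xs : List α) :
    (PySem.Set.ofList xs).filter p = PySem.Set.ofList (xs.filter p) := by
  induction xs using List.reverseRecOn with
  | nil => rfl
  | append_singleton xs x ih =>
    rw [PySem.Set.ofList_append_singleton, List.filter_append]
    by_cases hp : p x = true
    · rw [List.filter_cons_of_pos hp, List.filter_nil]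
      by_cases hx : x ∈ xs
      · rw [PySem.Set.add_of_mem ((PySem.Set.mem_ofList _ _).mpr hx),
          PySem.Set.ofList_append_singleton,
          PySem.Set.add_of_mem ((PySem.Set.mem_ofList _ _).mpr (List.mem_filter.mpr ⟨hx, hp⟩)), ih]
      · rw [PySem.Set.add_of_not_mem (fun h => hx ((PySem.Set.mem_ofList _ _).mp h)),
          List.filter_append, List.filter_cons_of_pos hp, List.filter_nil, ih,
          PySem.Set.ofList_append_singleton,
          PySem.Set.add_of_not_mem (fun h => hx (List.mem_of_mem_filter ((PySem.Set.mem_ofList _ _).mp h)))]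
    · rw [List.filter_cons_of_neg hp, List.filter_nil, List.append_nil]
      by_cases hx : x ∈ xs
      · rw [PySem.Set.add_of_mem ((PySem.Set.mem_ofList _ _).mpr hx), ih]
      · rw [PySem.Set.add_of_not_mem (fun h => hx ((PySem.Set.mem_ofList _ _).mp h)),
          List.filter_append, List.filter_cons_of_neg hp, List.filter_nil, List.append_nil, ih]

-- set(map g xs) = map g (set(xs)) for injective g.
theorem pvOfList_map_inj {α β : Type} [BEq α] [LawfulBEq α] [BEq β] [LawfulBEq β]
    (g : α → β) (hg : Function.Injective g) (xs : List α) :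
    PySem.Set.ofList (xs.map g) = (PySem.Set.ofList xs).map g := by
  induction xs using List.reverseRecOn with
  | nil => rfl
  | append_singleton xs x ih =>
    rw [List.map_append, List.map_singleton, PySem.Set.ofList_append_singleton,
      PySem.Set.ofList_append_singleton, ih]
    by_cases hx : x ∈ xs
    · rw [PySem.Set.add_of_mem ((PySem.Set.mem_ofList _ _).mpr hx),
        PySem.Set.add_of_mem (List.mem_map_of_mem ((PySem.Set.mem_ofList _ _).mpr hx))]
    · have hgx : g x ∉ (PySem.Set.ofList xs).map g := by
        intro h
        obtain ⟨a, ha, hax⟩ := List.mem_map.mp h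
        exact hx ((PySem.Set.mem_ofList _ _).mp (hg hax ▸ ha))
      rw [PySem.Set.add_of_not_mem (fun h => hx ((PySem.Set.mem_ofList _ _).mp h)),
        PySem.Set.add_of_not_mem hgx, List.map_append, List.map_singleton]

-- set(map g (set xs)) = set(map g xs): dedup of the image of a dedup.
theorem pvOfList_map_ofList {α β : Type} [BEq α] [LawfulBEq α] [BEq β] [LawfulBEq β]
    (g : α → β) (xs : List α) :
    PySem.Set.ofList ((PySem.Set.ofList xs).map g) = PySem.Set.ofList (xs.map g) := by
  induction xs using List.reverseRecOn with
  | nil => rfl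
  | append_singleton xs x ih =>
    rw [PySem.Set.ofList_append_singleton, List.map_append, List.map_singleton,
      PySem.Set.ofList_append_singleton]
    by_cases hx : x ∈ xs
    · rw [PySem.Set.add_of_mem ((PySem.Set.mem_ofList _ _).mpr hx), ih,
        PySem.Set.add_of_mem ((PySem.Set.mem_ofList _ _).mpr (List.mem_map_of_mem (f := g) hx))]
    · rw [PySem.Set.add_of_not_mem (fun h => hx ((PySem.Set.mem_ofList _ _).mp h)),
        List.map_append, List.map_singleton, PySem.Set.ofList_append_singleton, ih]

-- A's defaultdict merge loop, characterised as first-appearance keys with the fold of each key's fibre.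
theorem pvGroupFold {κ β ν : Type} [BEq κ] [LawfulBEq κ] [DecidableEq κ]
    (key : β → κ) (d0 : ν) (f : ν → β → ν) (L : List β) :
    (L.foldl (fun d t => PySem.Dict.modify d (key t) d0 (fun v => f v t)) PySem.Dict.empty).items
      = (PySem.Set.ofList (L.map key)).map
          (fun k => (k, (L.filter (fun t => key t == k)).foldl f d0)) := by
  induction L using List.reverseRecOn with
  | nil => rfl
  | append_singleton L t ih =>
    rw [List.foldl_append, List.foldl_cons, List.foldl_nil]
    set D := L.foldl (fun d t => PySem.Dict.modify d (key t) d0 (fun v => f v t)) PySem.Dict.empty with hD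
    have hkeys : D.keys = PySem.Set.ofList (L.map key) := by
      show D.items.map Prod.fst = _
      rw [ih, List.map_map]
      simp [Function.comp_def]
    have hnd : D.keys.Nodup := by rw [hkeys]; exact PySem.Set.nodup_ofList _
    have hmod : D.modify (key t) d0 (fun v => f v t) = D.insert (key t) (f (D.getD (key t) d0) t) := rfl
    rw [hmod, List.map_append, List.map_singleton, PySem.Set.ofList_append_singleton]
    by_cases hmem : key t ∈ L.map key
    · have hc : D.contains (key t) = true := by
        rw [PySem.Dict.contains_iff_mem_keys, hkeys]
        exact (PySem.Set.mem_ofList _ _).mpr hmem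
      have hval : D.getD (key t) d0 = (L.filter (fun s => key s == key t)).foldl f d0 := by
        refine PySem.Dict.getD_of_mem_items D ?_ hnd d0
        rw [ih]
        exact List.mem_map_of_mem ((PySem.Set.mem_ofList _ _).mpr hmem)
      rw [PySem.Dict.items_insert_of_contains D _ hc, ih, hval,
        PySem.Set.add_of_mem ((PySem.Set.mem_ofList _ _).mpr hmem), List.map_map]
      refine List.map_congr_left (fun k _ => ?_)
      by_cases hk : k = key t
      · subst hk
        simp [List.filter_append, List.foldl_append]
      · have hne : (key t == k) = false := beq_eq_false_iff_ne.mpr (Ne.symm hk)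
        have hne' : (k == key t) = false := beq_eq_false_iff_ne.mpr hk
        simp [List.filter_append, hne, hk]
    · have hc : D.contains (key t) = false := by
        rw [PySem.Dict.contains_eq_decide_mem_keys, hkeys]
        simp only [decide_eq_false_iff_not]
        exact fun h => hmem ((PySem.Set.mem_ofList _ _).mp h)
      have hval : D.getD (key t) d0 = d0 := PySem.Dict.getD_of_not_contains D d0 hc
      have hfilt : L.filter (fun s => key s == key t) = [] := by
        refine List.filter_eq_nil_iff.mpr (fun s hs => ?_)
        simp only [Bool.not_eq_true, beq_eq_false_iff_ne]
        exact fun h => hmem (h ▸ List.mem_map_of_mem hs)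
      rw [PySem.Dict.items_insert_of_not_contains D _ hc, ih, hval,
        PySem.Set.add_of_not_mem (fun h => hmem ((PySem.Set.mem_ofList _ _).mp h)),
        List.map_append, List.map_singleton]
      congr 1
      · refine List.map_congr_left (fun k hk => ?_)
        have hne : (key t == k) = false := by
          refine beq_eq_false_iff_ne.mpr (fun h => hmem ?_)
          exact h ▸ ((PySem.Set.mem_ofList _ _).mp hk)
        simp [List.filter_append, hne]
      · simp [List.filter_append, hfilt]

theorem pvA_eq_B (T : List (String × String × (String × Int) × String × List String)) :
    convert T = convert_alt T := by
  simp only [convert, convert_alt, pvGroupFold, List.map_map, List.filter_map, List.foldl_map,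
    pvOfList_filter, PySem.List.foldl_append_singleton_eq_map, List.nil_append,
    pvOfList_map_ofList, Function.comp_def]
  refine List.map_congr_left (fun k _ => ?_)
  refine congrArg (fun l => (k.1, k.2, l)) ?_
  have hmapk4 : (T.filter (fun t => (t.1, t.2.1) == k)).map (fun t => (t.1, t.2.1, t.2.2.1, t.2.2.2.1))
      = ((T.filter (fun t => (t.1, t.2.1) == k)).map (fun t => (t.2.2.1, t.2.2.2.1))).map
          (fun ci => (k.1, k.2, ci.1, ci.2)) := by
    rw [List.map_map]
    refine List.map_congr_left (fun t ht => ?_)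
    have h2 : (t.1, t.2.1) = k :=
      eq_of_beq (List.of_mem_filter (p := fun t : String × String × (String × Int) × String × List String => (t.1, t.2.1) == k) ht)
    rw [← h2]
    rfl
  have hembinj : Function.Injective (fun ci : (String × Int) × String => (k.1, k.2, ci.1, ci.2)) := by
    intro a b h
    simp only [Prod.mk.injEq, true_and] at h
    exact Prod.ext_iff.mpr h
  rw [hmapk4, pvOfList_map_inj _ hembinj, List.map_map]
  refine List.map_congr_left (fun ci _ => ?_)
  have hfilt : T.filter (fun t => ((t.1, t.2.1, t.2.2.1, t.2.2.2.1) : String × String × (String × Int) × String) == (k.1, k.2, ci.1, ci.2))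
      = (T.filter (fun t => (t.1, t.2.1) == k)).filter (fun t => (t.2.2.1, t.2.2.2.1) == ci) := by
    rw [List.filter_filter]
    refine List.filter_congr (fun t _ => ?_)
    rw [Bool.eq_iff_iff]
    simp only [beq_iff_eq, Bool.and_eq_true, Prod.ext_iff]
    tauto
  simp only [Function.comp_apply, hfilt]

-- ===== VERDICT (by name: the statement is the Claim_ definition above) =====
theorem convert_spec : Claim_equal_convert := by
  intro T _
  show convert T = convert_alt T
  exact pvA_eq_B T
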